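-- pv_equiv track=rewrite | github.com/EGalahad/AudioReactiveControls | controller/light_controller.py | rgb_to_spi_data
-- ===== SOURCE A (Python) =====
-- def rgb_to_spi_data(r, g, b):
--     r, g, b = int(r), int(g), int(b)
--     data = []
--     for color in [g, r, b]:  # WS2812 expects GRB order
--         for i in range(8):
--             if color & (1 << (7 - i)):
--                 data.append(0b11111000)  # 1 bit
--             else:
--                 data.append(0b11000000)  # 0 bit
--     return data
-- ===== SOURCE B (Python) =====
-- # Precomputed table: 8 SPI bytes for each possible byte value, MSB first.
-- _BYTE_TO_SPI = [
--     [0b11111000 if (v >> (7 - i)) & 1 else 0b11000000 for i in range(8)]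
--     for v in range(256)
-- ]
--
--
-- def rgb_to_spi_data(r, g, b):
--     r, g, b = int(r), int(g), int(b)
--     return _BYTE_TO_SPI[g & 0xFF] + _BYTE_TO_SPI[r & 0xFF] + _BYTE_TO_SPI[b & 0xFF]
-- ===== Notes on version B (the rewrite author's own statement) =====
-- stated objective: alternative
-- what changed: Replaces the nested per-bit loop with three lookups (in GRB order) into a module-level 256-entry table mapping each byte value to its 8 precomputed SPI bytes, masking each channel with & 0xFF.
import Mathlib
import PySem

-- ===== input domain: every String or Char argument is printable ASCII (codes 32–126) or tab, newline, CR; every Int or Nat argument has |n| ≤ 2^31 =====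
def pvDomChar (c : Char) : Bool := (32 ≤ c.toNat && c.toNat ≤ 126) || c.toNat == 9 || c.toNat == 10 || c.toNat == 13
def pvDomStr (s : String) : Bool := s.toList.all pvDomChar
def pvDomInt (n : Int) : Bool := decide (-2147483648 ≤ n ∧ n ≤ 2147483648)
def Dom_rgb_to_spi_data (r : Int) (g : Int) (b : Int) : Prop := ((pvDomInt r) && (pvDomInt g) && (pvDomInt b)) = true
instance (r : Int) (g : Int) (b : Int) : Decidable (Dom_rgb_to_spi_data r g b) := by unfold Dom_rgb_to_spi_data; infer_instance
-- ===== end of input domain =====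

-- B replaces A's nested per-bit loop by three lookups (GRB order) into a precomputed
-- 256-entry byte→SPI-bytes table; the return values are proved equal for all ints.

-- ===== PORT A =====
def rgb_to_spi_data (r : Int) (g : Int) (b : Int) : List Int :=
  -- r, g, b = int(r), int(g), int(b) is the identity on ints
  let data : List Int := []
  [g, r, b].foldl (fun data color =>
    (List.range 8).foldl (fun (data : List Int) (i : Nat) =>
      if PySem.Int.band color ((1 : Int) <<< (7 - i)) ≠ 0 then
        data ++ [0b11111000]
      else
        data ++ [0b11000000]) data) data

-- ===== PORT B =====
def BYTE_TO_SPI : List (List Int) :=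
  (List.range 256).map (fun v =>
    (List.range 8).map (fun i => if (v >>> (7 - i)) &&& 1 ≠ 0 then 0b11111000 else 0b11000000))

def rgb_to_spi_data_alt (r : Int) (g : Int) (b : Int) : List Int :=
  -- _BYTE_TO_SPI[x & 0xFF]: the index is always 0..255, so Python's indexing never
  -- raises; getD with an unreachable default is exact here.
  BYTE_TO_SPI.getD (PySem.Int.band g 255).toNat [] ++
  BYTE_TO_SPI.getD (PySem.Int.band r 255).toNat [] ++
  BYTE_TO_SPI.getD (PySem.Int.band b 255).toNat []

-- ===== PRECONDITION & SPEC =====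
def Spec_rgb_to_spi_data (r : Int) (g : Int) (b : Int) (out : List Int) : Prop := out = rgb_to_spi_data_alt r g b
instance (r : Int) (g : Int) (b : Int) (out : List Int) : Decidable (Spec_rgb_to_spi_data r g b out) := by unfold Spec_rgb_to_spi_data; infer_instance

-- ===== CLAIM (what is proved, stated in full; the proofs are below) =====
def Claim_equal_rgb_to_spi_data : Prop := ∀ (r : Int) (g : Int) (b : Int), Dom_rgb_to_spi_data r g b → Spec_rgb_to_spi_data r g b (rgb_to_spi_data r g b)

-- ===== LEMMAS AND PROOFS =====

theorem one_shl_eq (k : Nat) : (1 : Int) <<< k = ((2 ^ k : Nat) : Int) := by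
  rw [Int.shiftLeft_eq]; push_cast; ring

theorem nat_and_pow_ne (n k : Nat) : (n &&& 2 ^ k ≠ 0) ↔ n.testBit k := by
  rw [Nat.and_two_pow]
  rcases h : n.testBit k
  · simp
  · simp

theorem nat_and255 (n : Nat) : n &&& 255 = n % 256 := by
  have h : (255 : Nat) = 2 ^ 8 - 1 := rfl
  rw [h, Nat.and_two_pow_sub_one_eq_mod]

theorem nat_mod256_testBit (n : Nat) (k : Nat) (hk : k < 8) :
    (n % 256).testBit k = n.testBit k := by
  have h : (256 : Nat) = 2 ^ 8 := rfl
  rw [h, Nat.testBit_mod_two_pow]; simp [hk]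

set_option maxRecDepth 8192 in
theorem compl255_testBit : ∀ a < 256, ∀ k < 8, (255 - a).testBit k = !a.testBit k := by decide

theorem band_ofNat (n x : Nat) : PySem.Int.band (Int.ofNat n) ((x : Nat) : Int) = ((n &&& x : Nat) : Int) := by
  simp [PySem.Int.band]

theorem band_negSucc (n x : Nat) : PySem.Int.band (Int.negSucc n) ((x : Nat) : Int) = ((x - (x &&& n) : Nat) : Int) := by
  simp [PySem.Int.band]

-- bit k of c (tested A's way) equals bit k of the table index c & 0xFF
theorem band_bit (c : Int) (k : Nat) (hk : k < 8) :
    (PySem.Int.band c ((1 : Int) <<< k) ≠ 0) ↔ ((PySem.Int.band c 255).toNat).testBit k := by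
  rw [one_shl_eq, show (255 : Int) = ((255 : Nat) : Int) from rfl]
  rcases c with n | n
  · rw [band_ofNat, band_ofNat]
    simp only [Int.natCast_eq_zero, Int.toNat_natCast, ne_eq]
    rw [nat_and255, nat_mod256_testBit _ _ hk]
    exact nat_and_pow_ne n k
  · rw [band_negSucc, band_negSucc]
    simp only [Int.natCast_eq_zero, Int.toNat_natCast, ne_eq]
    rw [Nat.land_comm 255 n, nat_and255,
        compl255_testBit (n % 256) (Nat.mod_lt _ (by norm_num)) k hk,
        nat_mod256_testBit _ _ hk, Nat.land_comm (2 ^ k) n, Nat.and_two_pow]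
    rcases h : n.testBit k
    · simp
    · simp

theorem band255_lt (c : Int) : (PySem.Int.band c 255).toNat < 256 := by
  rw [show (255 : Int) = ((255 : Nat) : Int) from rfl]
  rcases c with n | n
  · rw [band_ofNat]
    simp only [Int.toNat_natCast]
    rw [nat_and255]
    exact Nat.mod_lt _ (by norm_num)
  · rw [band_negSucc]
    simp only [Int.toNat_natCast]
    omega

theorem table_getD (n : Nat) (hn : n < 256) :
    BYTE_TO_SPI.getD n [] =
      (List.range 8).map (fun i => if (n >>> (7 - i)) &&& 1 ≠ 0 then (0b11111000 : Int) else 0b11000000) := by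
  unfold BYTE_TO_SPI
  rw [List.getD_eq_getElem _ _ (by simpa using hn), List.getElem_map, List.getElem_range]

theorem shr_and_one (n k : Nat) : ((n >>> k) &&& 1 ≠ 0) ↔ n.testBit k := by
  rcases h : n.testBit k <;> simp [Nat.testBit] at h ⊢ <;> omega

theorem enc_byte (c : Int) :
    BYTE_TO_SPI.getD (PySem.Int.band c 255).toNat [] =
      (List.range 8).map (fun i : Nat =>
        if PySem.Int.band c ((1 : Int) <<< (7 - i)) ≠ 0 then (0b11111000 : Int) else 0b11000000) := by
  rw [table_getD _ (band255_lt c)]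
  refine List.map_congr_left (fun i hi => ?_)
  have hk : 7 - i < 8 := by omega
  by_cases h : PySem.Int.band c ((1 : Int) <<< (7 - i)) ≠ 0
  · rw [if_pos h, if_pos (by rw [shr_and_one]; exact (band_bit c _ hk).mp h)]
  · rw [if_neg h, if_neg (by rw [shr_and_one]; exact fun hb => h ((band_bit c _ hk).mpr hb))]

theorem foldl_append_map {α β : Type} (f : α → β) (l : List α) (acc : List β) :
    l.foldl (fun d i => d ++ [f i]) acc = acc ++ l.map f := by
  induction l generalizing acc with
  | nil => simp
  | cons x xs ih => simp [List.foldl_cons, ih]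

theorem inner_fold (c : Int) (acc : List Int) :
    (List.range 8).foldl (fun (data : List Int) (i : Nat) =>
        if PySem.Int.band c ((1 : Int) <<< (7 - i)) ≠ 0 then data ++ [0b11111000]
        else data ++ [0b11000000]) acc
      = acc ++ BYTE_TO_SPI.getD (PySem.Int.band c 255).toNat [] := by
  rw [enc_byte]
  have hstep : ∀ (d : List Int) (i : Nat),
      (if PySem.Int.band c ((1 : Int) <<< (7 - i)) ≠ 0 then d ++ [(0b11111000 : Int)] else d ++ [0b11000000])
        = d ++ [if PySem.Int.band c ((1 : Int) <<< (7 - i)) ≠ 0 then (0b11111000 : Int) else 0b11000000] := by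
    intro d i; split <;> rfl
  simp only [hstep]
  exact foldl_append_map _ _ acc

-- ===== VERDICT (by name: the statement is the Claim_ definition above) =====
theorem rgb_to_spi_data_spec : Claim_equal_rgb_to_spi_data := by
  intro r g b _
  unfold Spec_rgb_to_spi_data rgb_to_spi_data rgb_to_spi_data_alt
  simp only [List.foldl_cons, List.foldl_nil, inner_fold, List.nil_append, List.append_assoc]
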